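-- pv_equiv track=rewrite | github.com/ianhuang0630/VidObjClassHierarchy | data/gt_hierarchy.py | tree_dist
-- ===== SOURCE A (Python) =====
-- def tree_dist(loc1, loc2):
--     lock = False
--     dist = 0
--     for i in range(len(loc1)):
--         if lock:
--             dist += 2
--         if loc1[i] != loc2[i] and not lock:
--             lock = True
--             dist += 2
--     return dist
-- ===== SOURCE B (Python) =====
-- def tree_dist(loc1, loc2):
--     diffs = [i for i in range(len(loc1)) if loc1[i] != loc2[i]]
--     if not diffs:
--         return 0
--     return 2 * (len(loc1) - diffs[0])
-- ===== Notes on version B (the rewrite author's own statement) =====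
-- stated objective: simpler
-- what changed: Replaces the boolean-lock accumulator loop with collecting all differing indices and a closed-form 2*(len - first differing index).
import Mathlib
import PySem

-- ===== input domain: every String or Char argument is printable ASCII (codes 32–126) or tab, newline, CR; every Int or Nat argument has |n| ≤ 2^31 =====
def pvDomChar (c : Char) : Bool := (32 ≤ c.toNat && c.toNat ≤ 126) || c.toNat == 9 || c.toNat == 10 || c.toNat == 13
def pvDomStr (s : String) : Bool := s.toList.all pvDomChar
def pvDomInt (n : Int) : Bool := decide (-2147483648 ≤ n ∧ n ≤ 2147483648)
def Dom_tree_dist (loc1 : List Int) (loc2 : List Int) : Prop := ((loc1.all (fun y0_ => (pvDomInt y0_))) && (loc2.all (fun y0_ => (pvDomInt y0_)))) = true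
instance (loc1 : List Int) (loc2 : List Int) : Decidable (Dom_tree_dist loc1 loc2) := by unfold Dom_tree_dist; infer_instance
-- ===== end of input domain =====

-- B replaces A's boolean-lock accumulator loop by collecting the differing indices and a closed form (objective: simpler).

-- ===== PORT A =====
-- one loop iteration of A: first 'if lock: dist += 2', then the lock-setting branch
def treeDistStep (loc1 loc2 : List Int) (st : Bool × Int) (i : Int) : Bool × Int :=
  let st1 := if st.1 then (st.1, st.2 + 2) else st
  if PySem.List.pyGetD loc1 i 0 ≠ PySem.List.pyGetD loc2 i 0 ∧ ¬ st1.1 = true then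
    (true, st1.2 + 2)
  else st1

def tree_dist (loc1 : List Int) (loc2 : List Int) : Int :=
  ((PySem.List.pyRange 0 loc1.length 1).foldl (treeDistStep loc1 loc2) (false, 0)).2

-- ===== PORT B =====
def tree_dist_alt (loc1 : List Int) (loc2 : List Int) : Int :=
  let diffs := (PySem.List.pyRange 0 loc1.length 1).filter
    (fun i => PySem.List.pyGetD loc1 i 0 ≠ PySem.List.pyGetD loc2 i 0)
  match diffs with
  | [] => 0
  | j :: _ => 2 * ((loc1.length : Int) - j)

-- ===== PRECONDITION & SPEC =====
-- Pre_ excludes exactly the inputs where A raises IndexError (loc2 shorter than loc1); B raises there too.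
def Pre_tree_dist (loc1 : List Int) (loc2 : List Int) : Prop := loc1.length ≤ loc2.length
instance (loc1 : List Int) (loc2 : List Int) : Decidable (Pre_tree_dist loc1 loc2) := by unfold Pre_tree_dist; infer_instance
def pvWitness_tree_dist : List Int × List Int := ([1, 2, 3], [1, 5, 3])

def Spec_tree_dist (loc1 : List Int) (loc2 : List Int) (out : Int) : Prop := out = tree_dist_alt loc1 loc2
instance (loc1 : List Int) (loc2 : List Int) (out : Int) : Decidable (Spec_tree_dist loc1 loc2 out) := by unfold Spec_tree_dist; infer_instance

-- ===== CLAIM (what is proved, stated in full; the proofs are below) =====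
def Claim_equal_tree_dist : Prop := ∀ (loc1 : List Int) (loc2 : List Int), Dom_tree_dist loc1 loc2 → Pre_tree_dist loc1 loc2 → Spec_tree_dist loc1 loc2 (tree_dist loc1 loc2)

-- ===== LEMMAS AND PROOFS =====

-- once the lock is set, every remaining iteration just adds 2
theorem treeDist_fold_locked (loc1 loc2 : List Int) (l : List Int) (d : Int) :
    l.foldl (treeDistStep loc1 loc2) (true, d) = (true, d + 2 * l.length) := by
  induction l generalizing d with
  | nil => simp
  | cons x xs ih =>
      have hstep : treeDistStep loc1 loc2 (true, d) x = (true, d + 2) := by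
        simp [treeDistStep]
      rw [List.foldl_cons, hstep, ih]
      simp only [Prod.mk.injEq, List.length_cons]
      exact ⟨trivial, by push_cast; ring⟩

-- main invariant: from the unlocked state, the fold over a consecutive range [a,n)
-- is characterized by the first differing index in that range
theorem treeDist_fold_unlocked (loc1 loc2 : List Int) (k : Nat) :
    ∀ (a n : Int), a + k = n →
    (PySem.List.pyRange a n 1).foldl (treeDistStep loc1 loc2) (false, 0) =
      (match (PySem.List.pyRange a n 1).filter
          (fun i => PySem.List.pyGetD loc1 i 0 ≠ PySem.List.pyGetD loc2 i 0) with
       | [] => (false, (0 : Int))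
       | j :: _ => (true, 2 * (n - j))) := by
  induction k with
  | zero =>
      intro a n h
      rw [PySem.List.pyRange_one_eq_nil (by omega)]
      rfl
  | succ m ih =>
      intro a n h
      rw [PySem.List.pyRange_one_cons (by omega)]
      by_cases hp : PySem.List.pyGetD loc1 a 0 ≠ PySem.List.pyGetD loc2 a 0
      · have hstep : treeDistStep loc1 loc2 (false, 0) a = (true, 2) := by
          simp [treeDistStep, hp]
        simp only [List.foldl_cons, List.filter_cons, hstep]
        rw [treeDist_fold_locked]
        have hlen : (PySem.List.pyRange (a+1) n 1).length = m := by
          rw [PySem.List.length_pyRange_one]; omega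
        simp only [hlen]
        rw [if_pos (decide_eq_true hp)]
        show (true, 2 + 2 * (m : Int)) = (true, 2 * (n - a))
        have h2 : (2 : Int) + 2 * m = 2 * (n - a) := by omega
        rw [h2]
      · have hstep : treeDistStep loc1 loc2 (false, 0) a = (false, 0) := by
          simp [treeDistStep, hp]
        simp only [List.foldl_cons, List.filter_cons, hstep]
        rw [if_neg (by simpa using hp)]
        exact ih (a + 1) n (by omega)

-- ===== VERDICT (by name: the statement is the Claim_ definition above) =====
theorem tree_dist_spec : Claim_equal_tree_dist := by
  intro loc1 loc2 _ _
  unfold Spec_tree_dist tree_dist tree_dist_alt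
  rw [treeDist_fold_unlocked loc1 loc2 loc1.length 0 loc1.length (by omega)]
  cases h : (PySem.List.pyRange 0 loc1.length 1).filter
      (fun i => PySem.List.pyGetD loc1 i 0 ≠ PySem.List.pyGetD loc2 i 0) with
  | nil => simp
  | cons j js => simp
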